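-- pv_equiv track=rewrite | github.com/EBI-Metagenomics/mettannotator | postprocessing/update_gff_with_mapped_uniprot_ids.py | escape_reserved_characters
-- ===== SOURCE A (Python) =====
-- def escape_reserved_characters(string):
--     reserved_characters = [";", "=", "&"]
--     for ch in reserved_characters:
--         if ch in string:
--             if ch == ";":
--                 string = string.replace(ch, "/")
--             else:
--                 string = string.replace(ch, f"\{ch}")
--     return string
-- ===== SOURCE B (Python) =====
-- def escape_reserved_characters(string):
--     mapping = {";": "/", "=": "\\=", "&": "\\&"}
--     return "".join(mapping.get(c, c) for c in string)
-- ===== Notes on version B (the rewrite author's own statement) =====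
-- stated objective: idiomatic
-- what changed: Replaces A's three sequential whole-string replace passes (one scan per reserved character) with a single left-to-right pass over the characters that emits a table lookup per character and joins the pieces.
import Mathlib
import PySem

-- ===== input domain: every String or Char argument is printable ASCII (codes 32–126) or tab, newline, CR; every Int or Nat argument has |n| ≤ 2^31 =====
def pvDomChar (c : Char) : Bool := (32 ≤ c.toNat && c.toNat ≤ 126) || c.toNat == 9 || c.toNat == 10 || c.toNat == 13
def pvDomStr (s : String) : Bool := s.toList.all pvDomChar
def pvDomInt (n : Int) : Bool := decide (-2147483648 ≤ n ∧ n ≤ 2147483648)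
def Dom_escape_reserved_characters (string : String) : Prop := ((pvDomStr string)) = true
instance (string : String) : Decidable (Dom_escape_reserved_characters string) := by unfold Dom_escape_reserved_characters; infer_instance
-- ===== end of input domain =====

-- B replaces A's three sequential whole-string replace passes with a single
-- per-character pass over a lookup table (idiomatic; same return value on all strings).


-- ===== PORT A =====
-- for ch in [";", "=", "&"]: if ch in string: string = string.replace(ch, "/" or "\"+ch)
def escape_reserved_characters (string : String) : String :=
  ([";", "=", "&"] : List String).foldl
    (fun s ch =>
      if PySem.Str.isIn ch s then
        if ch = ";" then PySem.Str.replace s ch "/"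
        else PySem.Str.replace s ch (String.ofList ('\\' :: ch.toList))
      else s) string

-- ===== PORT B =====
-- mapping = {";": "/", "=": "\=", "&": "\&"}
def ercMapping : PySem.Dict String String :=
  PySem.Dict.ofList [(";", "/"), ("=", "\\="), ("&", "\\&")]

-- "".join(mapping.get(c, c) for c in string)
def escape_reserved_characters_alt (string : String) : String :=
  PySem.Str.join "" (string.toList.map (fun c =>
    ercMapping.getD (String.ofList [c]) (String.ofList [c])))

-- ===== PRECONDITION & SPEC =====
def Spec_escape_reserved_characters (string : String) (out : String) : Prop := out = escape_reserved_characters_alt string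
instance (string : String) (out : String) : Decidable (Spec_escape_reserved_characters string out) := by unfold Spec_escape_reserved_characters; infer_instance

-- ===== CLAIM (what is proved, stated in full; the proofs are below) =====
def Claim_equal_escape_reserved_characters : Prop := ∀ (string : String), Dom_escape_reserved_characters string → Spec_escape_reserved_characters string (escape_reserved_characters string)

-- ===== LEMMAS AND PROOFS =====

-- single-character substitution function performed by one replace pass
def ercSub (o : Char) (new : List Char) (c : Char) : List Char :=
  if c = o then new else [c]

-- B's per-character table, written as a function on characters
def ercTable (c : Char) : List Char :=
  if c = ';' then ['/'] else if c = '=' then ['\\', '='] else if c = '&' then ['\\', '&'] else [c]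

-- Chars.replace with a one-character pattern is a flatMap of the pointwise substitution
theorem erc_go_single (o : Char) (new : List Char) (cs : List Char) :
    ∀ (fuel : Nat) (acc : List Char), cs.length ≤ fuel →
      PySem.Chars.replace.go [o] new fuel cs acc
        = acc.reverse ++ cs.flatMap (ercSub o new) := by
  induction cs with
  | nil =>
    intro fuel acc _
    cases fuel <;> simp [PySem.Chars.replace.go]
  | cons c t ih =>
    intro fuel acc hfuel
    cases fuel with
    | zero => simp at hfuel
    | succ n =>
      by_cases hc : c = o
      · subst hc
        have hpre : [c].isPrefixOf (c :: t) = true := by simp [List.isPrefixOf]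
        simp only [PySem.Chars.replace.go, hpre, if_pos, List.length_cons,
          List.length_nil, List.drop_succ_cons, List.drop_zero]
        rw [ih n (new.reverse ++ acc) (by simpa using Nat.lt_succ_iff.mp (by simpa using hfuel))]
        simp [ercSub]
      · have hpre : [o].isPrefixOf (c :: t) = false := by
          simp [List.isPrefixOf]
          exact fun h => (hc h.symm).elim
        simp only [PySem.Chars.replace.go, hpre, Bool.false_eq_true]
        rw [ih n (c :: acc) (by simpa using Nat.lt_succ_iff.mp (by simpa using hfuel))]
        simp [ercSub, hc]

theorem erc_replace_single (o : Char) (new : List Char) (cs : List Char) :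
    PySem.Chars.replace cs [o] new = cs.flatMap (ercSub o new) := by
  simp only [PySem.Chars.replace, List.isEmpty_cons]
  exact erc_go_single o new cs cs.length [] le_rfl

-- if a character does not occur, the pointwise substitution is the identity
theorem erc_flatMap_id (o : Char) (new : List Char) (cs : List Char) (h : o ∉ cs) :
    cs.flatMap (ercSub o new) = cs := by
  induction cs with
  | nil => rfl
  | cons c t ih =>
    simp only [List.mem_cons, not_or] at h
    simp [ercSub, Ne.symm h.1, ih h.2]

-- one of A's loop iterations, as a transformation of the character list
theorem erc_step (s : String) (o : Char) (pat new : String) (hpat : pat.toList = [o]) :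
    (if PySem.Str.isIn pat s then PySem.Str.replace s pat new else s).toList
      = s.toList.flatMap (ercSub o new.toList) := by
  split_ifs with h
  · simp [PySem.Str.toList_replace, hpat, erc_replace_single]
  · rw [eq_comm]
    apply erc_flatMap_id
    intro hmem
    apply h
    rw [PySem.Str.isIn_eq, hpat, PySem.Chars.isIn_iff_infix]
    exact (List.singleton_infix_iff o s.toList).mpr hmem

-- evaluating B's dict lookup on one character
theorem erc_getD_eval (c : Char) :
    (ercMapping.getD (String.ofList [c]) (String.ofList [c])).toList = ercTable c := by
  by_cases h1 : c = ';'
  · subst h1; decide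
  · by_cases h2 : c = '='
    · subst h2; decide
    · by_cases h3 : c = '&'
      · subst h3; decide
      · have key : ∀ (d : Char), c ≠ d → ((String.ofList [d] : String) == String.ofList [c]) = false := by
          intro d hd
          simp only [beq_eq_false_iff_ne, ne_eq]
          intro hm
          have := congrArg String.toList hm
          simp at this
          exact hd this.symm
        have hitems : ercMapping.items = [(";", "/"), ("=", "\\="), ("&", "\\&")] := by decide
        simp only [PySem.Dict.getD, PySem.Dict.get?, hitems]
        have e1 : (";" == String.ofList [c]) = false := key ';' h1
        have e2 : ("=" == String.ofList [c]) = false := key '=' h2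
        have e3 : ("&" == String.ofList [c]) = false := key '&' h3
        simp [List.find?, e1, e2, e3, ercTable, h1, h2, h3]

-- composing the three substitution passes gives exactly B's table, characterwise
theorem erc_compose (c : Char) :
    ((ercSub ';' ['/'] c).flatMap (ercSub '=' ['\\', '='])).flatMap (ercSub '&' ['\\', '&'])
      = ercTable c := by
  by_cases h1 : c = ';'
  · subst h1; decide
  · by_cases h2 : c = '='
    · subst h2; decide
    · by_cases h3 : c = '&'
      · subst h3; decide
      · simp [ercSub, ercTable, h1, h2, h3]

theorem erc_join_nil (parts : List (List Char)) :
    PySem.Chars.join [] parts = parts.flatten := by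
  simp only [PySem.Chars.join]
  induction parts with
  | nil => rfl
  | cons p ps ih =>
    cases ps with
    | nil => simp [List.intercalate]
    | cons q qs =>
      simp only [List.intercalate, List.intersperse] at *
      simp_all [List.flatten]

-- ===== VERDICT (by name: the statement is the Claim_ definition above) =====
theorem escape_reserved_characters_spec : Claim_equal_escape_reserved_characters := by
  intro string _
  unfold Spec_escape_reserved_characters
  apply String.toList_inj.mp
  -- A side: three replace passes as flatMaps
  have hA : (escape_reserved_characters string).toList
      = ((string.toList.flatMap (ercSub ';' ['/'])).flatMap
          (ercSub '=' ['\\', '='])).flatMap (ercSub '&' ['\\', '&']) := by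
    simp only [escape_reserved_characters, List.foldl, String.reduceEq, reduceIte]
    rw [erc_step _ '&' "&" (String.ofList ('\\' :: "&".toList)) (by decide),
        erc_step _ '=' "=" (String.ofList ('\\' :: "=".toList)) (by decide),
        erc_step _ ';' ";" "/" (by decide)]
    rfl
  rw [hA, List.flatMap_assoc, List.flatMap_assoc]
  -- B side: join of per-character lookups
  simp only [escape_reserved_characters_alt, PySem.Str.toList_join, List.map_map]
  have : (String.toList "") = [] := rfl
  rw [this, erc_join_nil, ← List.flatMap_def]
  apply List.flatMap_congr
  intro c _
  rw [Function.comp_apply, erc_getD_eval, ← erc_compose c, List.flatMap_assoc]
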